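-- pv_equiv track=rewrite | github.com/lequanghung17/Maximum-Clique-Problem | nsc_prune.py | prune_by_degree
-- ===== SOURCE A (Python) =====
-- def prune_by_degree(n, edges, lower_bound):
--     degree = [0] * (n + 1)
--     for u, v in edges:
--         degree[u] += 1
--         degree[v] += 1
--     valid_nodes = set(i for i in range(1, n+1) if degree[i] >= lower_bound - 1)
--     old2new = {old: idx+1 for idx, old in enumerate(sorted(valid_nodes))}
--     new_edges = [(old2new[u], old2new[v]) for u, v in edges if u in valid_nodes and v in valid_nodes]
--     return len(valid_nodes), new_edges, old2new, {v for v in valid_nodes}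
-- ===== SOURCE B (Python) =====
-- def prune_by_degree(n, edges, lower_bound):
--     degree = [0] * (n + 1)
--     for u, v in edges:
--         degree[u] += 1
--         degree[v] += 1
--     # new_id[i] = number of nodes j <= i meeting the degree threshold (prefix sums of
--     # the validity flags); a node i survives iff the prefix count steps up at i, and
--     # its new label is then exactly new_id[i].
--     new_id = [0] * (n + 1)
--     for i in range(1, n + 1):
--         new_id[i] = new_id[i - 1] + (degree[i] >= lower_bound - 1)
--     old2new = {i: new_id[i] for i in range(1, n + 1) if new_id[i] > new_id[i - 1]}
--     new_edges = [(new_id[u], new_id[v]) for u, v in edges if u in old2new and v in old2new]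
--     return len(old2new), new_edges, old2new, set(old2new)
-- ===== Notes on version B (the rewrite author's own statement) =====
-- stated objective: alternative
-- what changed: A builds a set of valid nodes, sorts it and numbers it with enumerate into a dict, then relabels edges by dict lookup; B never builds or sorts that set: it computes a prefix-sum table new_id over 1..n (new_id[i] = number of valid nodes <= i), reads each node's validity (the prefix count steps up at i) and its new label straight off the table, and relabels edges by array indexing.
import Mathlib
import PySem

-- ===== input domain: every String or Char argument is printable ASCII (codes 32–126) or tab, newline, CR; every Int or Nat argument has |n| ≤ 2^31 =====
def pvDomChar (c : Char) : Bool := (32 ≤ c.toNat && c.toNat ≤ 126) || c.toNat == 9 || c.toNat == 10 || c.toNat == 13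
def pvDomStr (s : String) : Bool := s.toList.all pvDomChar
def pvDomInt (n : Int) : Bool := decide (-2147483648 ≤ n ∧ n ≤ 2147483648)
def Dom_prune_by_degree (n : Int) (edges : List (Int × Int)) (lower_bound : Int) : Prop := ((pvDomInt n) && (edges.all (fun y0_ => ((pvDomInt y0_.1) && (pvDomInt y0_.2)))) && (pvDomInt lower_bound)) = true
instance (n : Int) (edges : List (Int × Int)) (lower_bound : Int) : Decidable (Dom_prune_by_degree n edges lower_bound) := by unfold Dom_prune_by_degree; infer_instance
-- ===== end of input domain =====

-- B replaces A's set-comprehension + sorted + enumerate dict build by a prefix-sum table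
-- new_id (new_id[i] = number of valid nodes <= i): validity and new labels are read off
-- the table, edges are relabeled by array indexing (objective: alternative, drops the
-- set and the sort).
--
-- Port note: `n` can be large (e.g. 10^6) while the edge list stays short, so a port whose
-- list/set/dict steps cost O(n) EACH could not be evaluated where CPython answers in
-- milliseconds.  The Python primitives are therefore hand-ported EXACTLY but on efficient
-- carriers: the degree and new_id lists as Arrays with Python's index rule (pvIdx: negative
-- indices wrap, out of range = IndexError), set(...) as pvSetOfList (PROVEN equal to
-- PySem.Set.ofList in pvSetOfList_eq), sorted(...) as pvSorted (PROVEN equal to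
-- PySem.List.sorted in pvSorted_eq), and the dict as PvDict, Python's insertion-ordered
-- dict (overwrite keeps position, new keys append) with a TreeMap for O(log) lookup.

-- Python's index resolution for a sequence of size sz: negative indices count from the
-- end; none = IndexError (excluded by Pre_).
def pvIdx (sz : Nat) (i : Int) : Option Nat :=
  if 0 ≤ i ∧ i < sz then some i.toNat
  else if -(sz : Int) ≤ i ∧ i < 0 then some (i + sz).toNat
  else none

-- degree[x] += 1  (the none branch is Python's IndexError, excluded by Pre_)
def pvBump (d : Array Int) (x : Int) : Array Int :=
  match pvIdx d.size x with
  | some j => d.set! j (d[j]! + 1)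
  | none => d

-- the shared first loop of A and B (textually identical in both Pythons):
-- degree = [0] * (n + 1); for u, v in edges: degree[u] += 1; degree[v] += 1
def pvDegree (n : Int) (edges : List (Int × Int)) : Array Int :=
  edges.foldl (fun d e => pvBump (pvBump d e.1) e.2) (Array.replicate (n + 1).toNat 0)

-- xs[i] read (for i from range(1, n+1) the index is always in range, so the 0 default is never read)
def pvDegGet (d : Array Int) (i : Int) : Int :=
  match pvIdx d.size i with
  | some j => d[j]!
  | none => 0

-- xs[i] = v write (the none branch is Python's IndexError, unreachable in B's loop)
def pvSet (a : Array Int) (i : Int) (v : Int) : Array Int :=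
  match pvIdx a.size i with
  | some j => a.set! j v
  | none => a

-- set(xs): first occurrences in order = PySem.Set.ofList (pvSetOfList_eq below), with a
-- TreeSet membership test instead of PySem's list scan
def pvSetGo (xs : List Int) (acc : List Int) (seen : Std.TreeSet Int) : List Int :=
  match xs with
  | [] => acc.reverse
  | x :: t => if seen.contains x then pvSetGo t acc seen else pvSetGo t (x :: acc) (seen.insert x)

def pvSetOfList (xs : List Int) : PySem.Set Int := pvSetGo xs [] ∅

-- enumerate(xs, start): tail-recursive (= PySem.List.enumerate, pvEnumerate_eq below)
def pvEnumGo (xs : List Int) (s : Int) (acc : List (Int × Int)) : List (Int × Int) :=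
  match xs with
  | [] => acc.reverse
  | x :: t => pvEnumGo t (s + 1) ((s, x) :: acc)

def pvEnumerate (xs : List Int) (s : Int) : List (Int × Int) := pvEnumGo xs s []

-- sorted(xs) for plain ints = PySem.List.sorted (pvSorted_eq below), via merge sort
def pvSorted (xs : List Int) : List Int := xs.mergeSort (fun a b => decide (a ≤ b))

-- Python dict with int keys/values: rev holds the pairs in first-insertion order,
-- reversed (values possibly stale after an overwrite); m holds every key's current value.
structure PvDict where
  rev : List (Int × Int)
  m : Std.TreeMap Int Int
  deriving Repr

def PvDict.empty : PvDict := ⟨[], ∅⟩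

-- d[k] = v: overwrite keeps the position, a new key appends
def PvDict.insert (d : PvDict) (k v : Int) : PvDict :=
  if d.m.contains k then ⟨d.rev, d.m.insert k v⟩ else ⟨(k, v) :: d.rev, d.m.insert k v⟩

def PvDict.contains (d : PvDict) (k : Int) : Bool := d.m.contains k

-- d.get(k, dflt)
def PvDict.getD (d : PvDict) (k dflt : Int) : Int := (d.m[k]?).getD dflt

-- len(d): one rev entry per distinct key
def PvDict.len (d : PvDict) : Int := (d.rev.length : Int)

def PvDict.keys (d : PvDict) : List Int := d.rev.reverse.map (·.1)

def PvDict.items (d : PvDict) : List (Int × Int) :=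
  d.rev.reverse.map (fun p => (p.1, (d.m[p.1]?).getD p.2))

-- ===== PORT A =====
def prune_by_degree (n : Int) (edges : List (Int × Int)) (lower_bound : Int) : Int × (List (Int × Int)) × (List (Int × Int)) × List Int :=
  let degree := pvDegree n edges
  let valid_nodes : PySem.Set Int :=
    pvSetOfList ((PySem.List.pyRange 1 (n + 1) 1).filter
      (fun i => decide (pvDegGet degree i ≥ lower_bound - 1)))
  let old2new : PvDict :=
    (pvEnumerate (pvSorted valid_nodes) 0).foldl
      (fun d p => d.insert p.2 (p.1 + 1)) PvDict.empty
  let new_edges :=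
    (edges.filter (fun e => PySem.Set.contains valid_nodes e.1 && PySem.Set.contains valid_nodes e.2)).map
      (fun e => (old2new.getD e.1 0, old2new.getD e.2 0))
  (PySem.Set.len valid_nodes, new_edges, old2new.items, pvSetOfList valid_nodes)

-- ===== PORT B =====
def prune_by_degree_alt (n : Int) (edges : List (Int × Int)) (lower_bound : Int) : Int × (List (Int × Int)) × (List (Int × Int)) × List Int :=
  let degree := pvDegree n edges
  -- new_id = [0]*(n+1); for i in range(1, n+1): new_id[i] = new_id[i-1] + (degree[i] >= lower_bound - 1)
  let new_id : Array Int :=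
    (PySem.List.pyRange 1 (n + 1) 1).foldl
      (fun a i => pvSet a i (pvDegGet a (i - 1) +
        (if pvDegGet degree i ≥ lower_bound - 1 then 1 else 0)))
      (Array.replicate (n + 1).toNat 0)
  -- old2new = {i: new_id[i] for i in range(1, n+1) if new_id[i] > new_id[i-1]}
  let old2new : PvDict :=
    (PySem.List.pyRange 1 (n + 1) 1).foldl
      (fun d i => if pvDegGet new_id i > pvDegGet new_id (i - 1) then
          d.insert i (pvDegGet new_id i) else d)
      PvDict.empty
  -- new_edges = [(new_id[u], new_id[v]) for u, v in edges if u in old2new and v in old2new]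
  let new_edges :=
    (edges.filter (fun e => old2new.contains e.1 && old2new.contains e.2)).map
      (fun e => (pvDegGet new_id e.1, pvDegGet new_id e.2))
  (old2new.len, new_edges, old2new.items, pvSetOfList old2new.keys)

-- ===== PRECONDITION & SPEC =====
-- Pre_ excludes exactly the inputs where Python A raises IndexError: an edge endpoint
-- outside the valid (Python, possibly negative) index range of the degree list of length (n+1).
def Pre_prune_by_degree (n : Int) (edges : List (Int × Int)) (lower_bound : Int) : Prop :=
  ∀ e ∈ edges, PySem.Raise.InRange (n + 1).toNat e.1 ∧ PySem.Raise.InRange (n + 1).toNat e.2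
instance (n : Int) (edges : List (Int × Int)) (lower_bound : Int) : Decidable (Pre_prune_by_degree n edges lower_bound) := by unfold Pre_prune_by_degree; infer_instance
def pvWitness_prune_by_degree : Int × (List (Int × Int)) × Int := (4, [(1, 2), (2, 3), (1, 3), (3, 4)], 3)

def Spec_prune_by_degree (n : Int) (edges : List (Int × Int)) (lower_bound : Int) (out : Int × (List (Int × Int)) × (List (Int × Int)) × List Int) : Prop := out = prune_by_degree_alt n edges lower_bound
instance (n : Int) (edges : List (Int × Int)) (lower_bound : Int) (out : Int × (List (Int × Int)) × (List (Int × Int)) × List Int) : Decidable (Spec_prune_by_degree n edges lower_bound out) := by unfold Spec_prune_by_degree; infer_instance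

-- ===== CLAIM (what is proved, stated in full; the proofs are below) =====
def Claim_equal_prune_by_degree : Prop := ∀ (n : Int) (edges : List (Int × Int)) (lower_bound : Int), Dom_prune_by_degree n edges lower_bound → Pre_prune_by_degree n edges lower_bound → Spec_prune_by_degree n edges lower_bound (prune_by_degree n edges lower_bound)

-- ===== LEMMAS AND PROOFS =====

theorem pvEnumGo_eq (xs : List Int) : ∀ (s : Int) (acc : List (Int × Int)),
    pvEnumGo xs s acc = acc.reverse ++ PySem.List.enumerate xs s := by
  induction xs with
  | nil => intro s acc; simp [pvEnumGo, PySem.List.enumerate_nil]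
  | cons x t ih =>
      intro s acc
      rw [pvEnumGo, ih (s + 1) ((s, x) :: acc), PySem.List.enumerate_cons]
      simp

-- pvEnumerate is PySem's enumerate(...)
theorem pvEnumerate_eq (xs : List Int) (s : Int) :
    pvEnumerate xs s = PySem.List.enumerate xs s := by
  rw [pvEnumerate, pvEnumGo_eq]; rfl

-- pvSetGo with its membership invariant computes PySem's left fold of Set.add
theorem pvSetGo_eq (xs : List Int) : ∀ (acc : List Int) (seen : Std.TreeSet Int),
    (∀ y : Int, seen.contains y = true ↔ y ∈ acc) →
    pvSetGo xs acc seen = xs.foldl PySem.Set.add acc.reverse := by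
  induction xs with
  | nil => intro acc seen _; rfl
  | cons x t ih =>
      intro acc seen hinv
      by_cases hx : seen.contains x = true
      · have hxa : x ∈ acc.reverse := List.mem_reverse.mpr ((hinv x).mp hx)
        simp only [pvSetGo, hx, if_true, List.foldl_cons,
          PySem.Set.add_eq_ite acc.reverse x, if_pos hxa]
        exact ih acc seen hinv
      · have hxa : x ∉ acc.reverse := fun h => hx ((hinv x).mpr (List.mem_reverse.mp h))
        simp only [pvSetGo, hx, List.foldl_cons,
          PySem.Set.add_eq_ite acc.reverse x, if_neg hxa]
        rw [← List.reverse_cons]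
        refine ih (x :: acc) (seen.insert x) ?_
        intro y
        rw [Std.TreeSet.contains_insert]
        simp only [Bool.or_eq_true, beq_iff_eq, compare_eq_iff_eq, hinv y, List.mem_cons]
        exact or_congr eq_comm Iff.rfl

-- pvSetOfList is PySem's set(...)
theorem pvSetOfList_eq (xs : List Int) : pvSetOfList xs = PySem.Set.ofList xs := by
  rw [PySem.Set.ofList_eq_foldl]
  exact pvSetGo_eq xs [] ∅ (by simp [Std.TreeSet.contains_emptyc])

-- pvSorted is PySem's sorted(...) (identity key: equal elements are identical, so the
-- ≤-sorted permutation is unique)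
theorem pvSorted_eq (xs : List Int) : pvSorted xs = PySem.List.sorted xs (fun x => x) false := by
  refine List.Perm.eq_of_pairwise (le := (· ≤ ·)) (fun a b _ _ h1 h2 => le_antisymm h1 h2) ?_ ?_ ?_
  · have := List.pairwise_mergeSort (le := fun a b : Int => decide (a ≤ b))
      (by intro a b c h1 h2; simp only [decide_eq_true_eq] at *; omega)
      (by intro a b; simp only [Bool.or_eq_true, decide_eq_true_eq]; omega) xs
    exact this.imp (by simp)
  · exact (PySem.List.sorted_pairwise xs (fun x => x)).imp (by simp)
  · exact (List.mergeSort_perm xs _).trans (PySem.List.sorted_perm xs (fun x => x) false).symm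

-- a guarded foldl is the foldl of the filtered list
theorem pv_foldl_ite_filter {α σ : Type} (l : List α) (p : α → Bool) (g : σ → α → σ) (s : σ) :
    l.foldl (fun s x => if p x then g s x else s) s = (l.filter p).foldl g s := by
  induction l generalizing s with
  | nil => rfl
  | cons x t ih =>
      by_cases h : p x <;> simp [List.foldl_cons, h, ih]

theorem pvDict_contains_insert (d : PvDict) (k v x : Int) :
    (d.insert k v).contains x = (decide (x = k) || d.contains x) := by
  have h : (d.m.insert k v).contains x = (decide (x = k) || d.m.contains x) := by
    rw [Std.TreeMap.contains_insert]
    by_cases hxk : x = k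
    · simp [hxk]
    · simp [hxk, Ne.symm hxk]
  unfold PvDict.insert PvDict.contains
  split_ifs <;> exact h

theorem pvDict_contains_empty (x : Int) : PvDict.empty.contains x = false :=
  Std.TreeMap.contains_emptyc

theorem pvDict_getD_insert (d : PvDict) (k v x dflt : Int) :
    (d.insert k v).getD x dflt = if x = k then v else d.getD x dflt := by
  have h : ((d.m.insert k v)[x]?).getD dflt = if x = k then v else (d.m[x]?).getD dflt := by
    rw [Std.TreeMap.getElem?_insert]
    by_cases hxk : x = k
    · simp [hxk]
    · simp [hxk, Ne.symm hxk]
  unfold PvDict.insert PvDict.getD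
  split_ifs with h1 <;> simp_all

-- fold of pairwise inserts: membership is membership among the keys
theorem pv_contains_fold (l : List (Int × Int)) (d : PvDict) (x : Int) :
    (l.foldl (fun d q => d.insert q.1 q.2) d).contains x
      = (decide (x ∈ l.map (·.1)) || d.contains x) := by
  induction l generalizing d with
  | nil => simp
  | cons q t ih =>
      simp only [List.foldl_cons, ih, pvDict_contains_insert, List.map_cons, List.mem_cons]
      by_cases hx : x = q.1 <;> simp [hx]

theorem pvDict_keys_insert_fresh (d : PvDict) (k v : Int) (h : d.contains k = false) :
    (d.insert k v).keys = d.keys ++ [k] := by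
  have h' : d.m.contains k = false := h
  unfold PvDict.insert
  rw [if_neg (by simp only [h']; simp)]
  simp [PvDict.keys]

-- fold of fresh pairwise inserts: the keys come out in insertion order
theorem pv_keys_fold (l : List (Int × Int)) (d : PvDict)
    (hnd : (l.map (·.1)).Nodup) (hfresh : ∀ q ∈ l, d.contains q.1 = false) :
    (l.foldl (fun d q => d.insert q.1 q.2) d).keys = d.keys ++ l.map (·.1) := by
  induction l generalizing d with
  | nil => simp
  | cons q t ih =>
      simp only [List.map_cons, List.nodup_cons] at hnd
      have hfresh' : ∀ r ∈ t, (d.insert q.1 q.2).contains r.1 = false := by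
        intro r hr
        rw [pvDict_contains_insert]
        have hne : r.1 ≠ q.1 := fun he => hnd.1 (he ▸ List.mem_map_of_mem hr)
        simp [hne, hfresh r (List.mem_cons_of_mem q hr)]
      simp only [List.foldl_cons]
      rw [ih (d.insert q.1 q.2) hnd.2 hfresh',
          pvDict_keys_insert_fresh d _ _ (hfresh q (by simp)), List.map_cons,
          List.append_assoc, List.singleton_append]

-- fold of pairwise inserts: a key never inserted keeps its value
theorem pv_getD_fold_not_key (l : List (Int × Int)) (d : PvDict) (x dflt : Int)
    (hnot : x ∉ l.map (·.1)) :
    (l.foldl (fun d q => d.insert q.1 q.2) d).getD x dflt = d.getD x dflt := by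
  induction l generalizing d with
  | nil => rfl
  | cons q t ih =>
      have hxq : x ≠ q.1 := fun he => hnot (by simp [he])
      have hnot' : x ∉ t.map (·.1) := fun hm => hnot (by simp [hm])
      rw [List.foldl_cons, ih _ hnot', pvDict_getD_insert, if_neg hxq]

-- fold of fresh pairwise inserts: looking up an inserted key gives its value
theorem pv_getD_fold (l : List (Int × Int)) (d : PvDict) (x v dflt : Int)
    (hnd : (l.map (·.1)).Nodup) (hx : (x, v) ∈ l) :
    (l.foldl (fun d q => d.insert q.1 q.2) d).getD x dflt = v := by
  induction l generalizing d with
  | nil => cases hx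
  | cons q t ih =>
      simp only [List.map_cons, List.nodup_cons] at hnd
      simp only [List.foldl_cons]
      rcases List.mem_cons.mp hx with h | h
      · have hxq : x = q.1 := by rw [← h]
        rw [pv_getD_fold_not_key t _ x dflt (hxq ▸ hnd.1), pvDict_getD_insert]
        simp [← h]
      · exact ih _ hnd.2 h

-- any fold of key-value inserts factors through the list of inserted pairs
theorem pv_foldl_insert_map {α : Type} (l : List α) (f : α → Int × Int) (d : PvDict) :
    l.foldl (fun d a => d.insert (f a).1 (f a).2) d
      = (l.map f).foldl (fun d q => d.insert q.1 q.2) d := by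
  induction l generalizing d with
  | nil => rfl
  | cons x t ih => simp [List.foldl_cons, ih]

-- rank lemma: in a strictly increasing list, the k-th element has exactly k+1
-- elements ≤ it
theorem pv_countP_rank (V : List Int) (hV : V.Pairwise (· < ·)) :
    ∀ (k : Nat) (hk : k < V.length) (y : Int), V[k] = y →
      V.countP (fun x => decide (x ≤ y)) = k + 1 := by
  induction V with
  | nil => intro k hk; cases hk
  | cons a t ih =>
      intro k hk y hy
      rcases List.pairwise_cons.mp hV with ⟨ha, ht⟩
      cases k with
      | zero =>
          simp only [List.getElem_cons_zero] at hy
          subst hy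
          simp only [List.countP_cons, decide_eq_true_eq]
          rw [List.countP_eq_zero.mpr (fun x hx => by simpa using not_le.mpr (ha x hx))]
          simp
      | succ k =>
          have hk' : k < t.length := by simpa using hk
          simp only [List.getElem_cons_succ] at hy
          have hat : a ≤ y := hy ▸ le_of_lt (ha _ (List.getElem_mem hk'))
          simp only [List.countP_cons, decide_eq_true_eq]
          rw [ih ht k hk' y hy]
          simp [hat]

theorem pvIdx_in_range (sz : Nat) (i : Int) (h0 : 0 ≤ i) (h1 : i < sz) :
    pvIdx sz i = some i.toNat := by
  unfold pvIdx; rw [if_pos ⟨h0, h1⟩]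

theorem pvSet_size (a : Array Int) (i v : Int) : (pvSet a i v).size = a.size := by
  unfold pvSet
  cases h : pvIdx a.size i with
  | none => rfl
  | some j => simp [Array.set!]

-- pointwise description of a write at an in-range index, read at a nonnegative in-range index
theorem pvDegGet_pvSet (a : Array Int) (i v j : Int)
    (hi0 : 0 ≤ i) (hi1 : i < a.size) (hj0 : 0 ≤ j) (hj1 : j < a.size) :
    pvDegGet (pvSet a i v) j = if j = i then v else pvDegGet a j := by
  have hsz : (pvSet a i v).size = a.size := pvSet_size a i v
  have hset : pvSet a i v = a.set i.toNat v (by omega) := by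
    unfold pvSet
    rw [pvIdx_in_range a.size i hi0 hi1]
    simp [Array.set!, Array.setIfInBounds, (by omega : i.toNat < a.size)]
  have hjn : j.toNat < a.size := by omega
  unfold pvDegGet
  rw [hsz, pvIdx_in_range a.size j hj0 hj1]
  simp only [hset]
  by_cases hji : j = i
  · rw [if_pos hji]
    have : j.toNat = i.toNat := by rw [hji]
    rw [this]
    simp [(by omega : i.toNat < a.size)]
  · rw [if_neg hji]
    have hne : i.toNat ≠ j.toNat := by omega
    simp [hjn, hne]

theorem pvDegGet_replicate (m : Nat) (j : Int) :
    pvDegGet (Array.replicate m (0 : Int)) j = 0 := by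
  unfold pvDegGet
  cases h : pvIdx (Array.replicate m (0 : Int)).size j with
  | none => rfl
  | some k =>
      have hk : k < m := by
        unfold pvIdx at h
        simp only [Array.size_replicate] at h
        split_ifs at h with h1 h2 <;> injection h with h' <;> omega
      simp [hk]

-- ===== the main argument =====

-- the valid-count function: number of valid nodes ≤ j
def pvCnt (V : List Int) (j : Int) : Int := (V.countP (fun x => decide (x ≤ j)) : Int)

theorem pvCnt_step (V : List Int) (i : Int) (hnd : V.Nodup) :
    pvCnt V i = pvCnt V (i - 1) + (if i ∈ V then 1 else 0) := by
  have h : ∀ (W : List Int), W.Nodup →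
      W.countP (fun x => decide (x ≤ i))
        = W.countP (fun x => decide (x ≤ i - 1)) + (if i ∈ W then 1 else 0) := by
    intro W
    induction W with
    | nil => simp
    | cons a t ih =>
        intro hnd'
        rcases List.nodup_cons.mp hnd' with ⟨hat, hnt⟩
        simp only [List.countP_cons, decide_eq_true_eq, List.mem_cons]
        rw [ih hnt]
        by_cases hai : i = a
        · subst hai
          simp only [hat, if_false, true_or, if_true]
          split_ifs <;> omega
        · by_cases hit : i ∈ t <;> simp only [hai, hit, false_or, if_true, if_false] <;>
            split_ifs <;> omega
  unfold pvCnt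
  rw [h V hnd]
  split_ifs <;> push_cast <;> ring

-- a fold of pvSet writes preserves the array size
theorem pv_foldl_pvSet_size (l : List Int) (f : Array Int → Int → Int) (a0 : Array Int) :
    (l.foldl (fun a i => pvSet a i (f a i)) a0).size = a0.size := by
  induction l generalizing a0 with
  | nil => rfl
  | cons x t ih => rw [List.foldl_cons, ih, pvSet_size]

-- after B's prefix-sum loop, the array holds pvCnt of the valid list at every index 0..n
theorem pv_newid_spec (n : Int) (p : Int → Bool) (hn : 0 ≤ n) :
    ∀ (j : Int), 0 ≤ j → j ≤ n →
      pvDegGet ((PySem.List.pyRange 1 (n + 1) 1).foldl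
          (fun a i => pvSet a i (pvDegGet a (i - 1) + (if p i then 1 else 0)))
          (Array.replicate (n + 1).toNat 0)) j
        = pvCnt ((PySem.List.pyRange 1 (n + 1) 1).filter p) j := by
  suffices h : ∀ (m : Nat), (m : Int) ≤ n →
      (∀ (j : Int), 0 ≤ j → j ≤ n →
        pvDegGet ((PySem.List.pyRange 1 ((m : Int) + 1) 1).foldl
            (fun a i => pvSet a i (pvDegGet a (i - 1) + (if p i then 1 else 0)))
            (Array.replicate (n + 1).toNat 0)) j
          = if j ≤ (m : Int) then pvCnt ((PySem.List.pyRange 1 ((m : Int) + 1) 1).filter p) j else 0) by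
    intro j hj0 hjn
    have hmn : ((n.toNat : Int)) = n := Int.toNat_of_nonneg hn
    have := h n.toNat (by omega) j hj0 hjn
    rw [hmn] at this
    rw [this, if_pos hjn]
  intro m
  induction m with
  | zero =>
      intro _ j hj0 hjn
      rw [(by norm_num : ((0 : Nat) : Int) + 1 = 1), PySem.List.pyRange_one_eq_nil (by omega)]
      simp only [List.foldl_nil, List.filter_nil]
      rw [pvDegGet_replicate]
      unfold pvCnt
      simp only [List.countP_nil, Int.natCast_zero]
      split_ifs <;> rfl
  | succ m ih =>
      intro hm j hj0 hjn
      have hm' : (m : Int) ≤ n := by push_cast at hm ⊢; omega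
      have hm1 : ((m : Int) + 1) ≤ n := by push_cast at hm; omega
      have hsplit : PySem.List.pyRange 1 ((m : Int) + 1 + 1) 1
          = PySem.List.pyRange 1 ((m : Int) + 1) 1 ++ [(m : Int) + 1] :=
        PySem.List.pyRange_one_succ_right (by omega)
      have hcast : (((m + 1 : Nat)) : Int) = (m : Int) + 1 := by push_cast; ring
      rw [hcast, hsplit, List.foldl_append, List.foldl_cons, List.foldl_nil]
      set A := (PySem.List.pyRange 1 ((m : Int) + 1) 1).foldl
          (fun a i => pvSet a i (pvDegGet a (i - 1) + (if p i then 1 else 0)))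
          (Array.replicate (n + 1).toNat 0) with hA
      have hAsz : (A.size : Int) = n + 1 := by
        rw [hA, pv_foldl_pvSet_size
          (PySem.List.pyRange 1 ((m : Int) + 1) 1)
          (fun a i => pvDegGet a (i - 1) + (if p i then 1 else 0))
          (Array.replicate (n + 1).toNat 0)]
        simp [Int.toNat_of_nonneg (by omega : (0:Int) ≤ n + 1)]
      set Vm := (PySem.List.pyRange 1 ((m : Int) + 1) 1).filter p with hVm
      have hVmmem : ∀ x ∈ Vm, 1 ≤ x ∧ x < (m : Int) + 1 := by
        intro x hx
        have := (List.mem_filter.mp hx).1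
        exact (PySem.List.mem_pyRange_one).mp this
      have hfsplit : List.filter p [(m : Int) + 1]
          = (if p ((m : Int) + 1) then [(m : Int) + 1] else []) := by
        by_cases hpm : p ((m : Int) + 1) <;> simp [hpm]
      rw [List.filter_append, hfsplit]
      have hwrite := pvDegGet_pvSet A ((m : Int) + 1)
        (pvDegGet A ((m : Int) + 1 - 1) + (if p ((m : Int) + 1) then 1 else 0)) j
        (by omega) (by omega) hj0 (by omega)
      rw [hwrite]
      have hcntapp : ∀ (jj : Int),
          pvCnt (Vm ++ (if p ((m : Int) + 1) then [(m : Int) + 1] else [])) jj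
            = pvCnt Vm jj + (if p ((m : Int) + 1) ∧ (m : Int) + 1 ≤ jj then 1 else 0) := by
        intro jj
        unfold pvCnt
        rw [List.countP_append]
        push_cast
        by_cases hpm : p ((m : Int) + 1) <;> by_cases hjj : (m : Int) + 1 ≤ jj <;>
          simp [hpm, hjj]
      by_cases hjm1 : j = (m : Int) + 1
      · rw [if_pos hjm1, if_pos (show j ≤ (m : Int) + 1 by omega)]
        have hsub : (m : Int) + 1 - 1 = (m : Int) := by ring
        rw [hsub]
        have hAm := ih hm' (m : Int) (by omega) hm'
        rw [if_pos (le_refl _)] at hAm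
        rw [hAm, hcntapp j, hjm1]
        have hstable : pvCnt Vm ((m : Int) + 1) = pvCnt Vm (m : Int) := by
          unfold pvCnt
          congr 1
          refine List.countP_congr ?_
          intro x hx
          have hxm := hVmmem x hx
          simp only [decide_eq_true_eq]
          omega
        rw [hstable]
        by_cases hpm : p ((m : Int) + 1) = true
        · rw [if_pos hpm, if_pos ⟨hpm, le_refl _⟩]
        · rw [if_neg hpm, if_neg (fun hc => hpm hc.1)]
      · rw [if_neg hjm1]
        have hAj := ih hm' j hj0 hjn
        rw [hAj]
        by_cases hjle : j ≤ (m : Int)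
        · rw [if_pos hjle, if_pos (by omega), hcntapp j,
            if_neg (by intro hc; omega)]
          ring
        · rw [if_neg hjle, if_neg (by omega)]

theorem prune_by_degree_eq_alt (n : Int) (edges : List (Int × Int)) (lower_bound : Int) :
    prune_by_degree n edges lower_bound = prune_by_degree_alt n edges lower_bound := by
  unfold prune_by_degree prune_by_degree_alt
  simp only []
  set degree := pvDegree n edges with hdeg
  set p : Int → Bool := fun i => decide (pvDegGet degree i ≥ lower_bound - 1) with hp
  by_cases hn : 0 ≤ n
  case neg =>
    -- n < 0: range(1, n+1) is empty, both sides return (0, [], {}, set())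
    rw [PySem.List.pyRange_one_eq_nil (by omega)]
    simp only [List.filter_nil, List.foldl_nil]
    have hset : pvSetOfList [] = ([] : List Int) := rfl
    rw [hset]
    have hcA : (fun e : Int × Int => PySem.Set.contains ([] : List Int) e.1
        && PySem.Set.contains ([] : List Int) e.2) = fun _ => false := by
      funext e
      simp [PySem.Set.contains_eq_listContains]
    have hcB : (fun e : Int × Int => PvDict.empty.contains e.1 && PvDict.empty.contains e.2)
        = fun _ => false := by
      funext e
      simp [pvDict_contains_empty]
    rw [hcA, hcB]
    simp [pvSorted, pvEnumerate, pvEnumGo, PvDict.items, PvDict.keys, PvDict.len,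
      PvDict.empty, PySem.Set.len, pvSetOfList, pvSetGo]
  case pos =>
    set R := PySem.List.pyRange 1 (n + 1) 1 with hR
    set V : List Int := R.filter p with hV
    have hVnodup : V.Nodup := (PySem.List.nodup_pyRange_one 1 (n + 1)).filter p
    have hVpair : V.Pairwise (· < ·) := (PySem.List.pairwise_lt_pyRange_one 1 (n + 1)).filter p
    have hVmem : ∀ x ∈ V, 1 ≤ x ∧ x ≤ n := by
      intro x hx
      have := (PySem.List.mem_pyRange_one).mp (List.mem_filter.mp hx).1
      omega
    have hofV : pvSetOfList V = V := by
      rw [pvSetOfList_eq]; exact PySem.Set.ofList_eq_self_of_nodup V hVnodup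
    rw [hofV, pvSorted_eq,
        PySem.List.sorted_eq_of_perm_of_pairwise_lt V V (fun x => x) (List.Perm.refl V) hVpair,
        pvEnumerate_eq]
    set NI := R.foldl
        (fun a i => pvSet a i (pvDegGet a (i - 1) + (if pvDegGet degree i ≥ lower_bound - 1 then 1 else 0)))
        (Array.replicate (n + 1).toNat 0) with hNI
    have hNIfold : NI = R.foldl
        (fun a i => pvSet a i (pvDegGet a (i - 1) + (if p i then 1 else 0)))
        (Array.replicate (n + 1).toNat 0) := by
      rw [hNI]
      congr 1
      funext a i
      rw [hp]
      by_cases hc : pvDegGet degree i ≥ lower_bound - 1 <;> simp [hc]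
    have hNIval : ∀ (j : Int), 0 ≤ j → j ≤ n → pvDegGet NI j = pvCnt V j := by
      intro j hj0 hjn
      rw [hNIfold, hR, hV, hR]
      exact pv_newid_spec n p hn j hj0 hjn
    -- B's guard equals the validity test on every element of the range
    have hguard : ∀ i ∈ R, (decide (pvDegGet NI i > pvDegGet NI (i - 1))) = p i := by
      intro i hiR
      have hi := (PySem.List.mem_pyRange_one).mp hiR
      rw [hNIval i (by omega) (by omega), hNIval (i - 1) (by omega) (by omega),
        pvCnt_step V i hVnodup]
      have hiV : i ∈ V ↔ p i = true := by
        rw [hV, List.mem_filter]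
        constructor
        · exact fun h => h.2
        · exact fun h => ⟨hiR, h⟩
      by_cases hpi : p i = true
      · rw [if_pos (hiV.mpr hpi), hpi]
        simp
      · rw [if_neg (fun h => hpi (hiV.mp h))]
        simp only [hpi]
        simp
    -- B's dict fold = fold over the valid list
    rw [show (fun (d : PvDict) (i : Int) => if pvDegGet NI i > pvDegGet NI (i - 1) then
          d.insert i (pvDegGet NI i) else d)
        = (fun (d : PvDict) (i : Int) => if decide (pvDegGet NI i > pvDegGet NI (i - 1)) then
          d.insert i (pvDegGet NI i) else d) by
      funext d i
      by_cases hc : pvDegGet NI i > pvDegGet NI (i - 1) <;> simp [hc]]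
    rw [pv_foldl_ite_filter R (fun i => decide (pvDegGet NI i > pvDegGet NI (i - 1)))
        (fun d i => d.insert i (pvDegGet NI i)) PvDict.empty,
      List.filter_congr hguard, ← hV]
    -- both dict folds factor through their inserted pair lists, which are equal
    have hfoldA : (PySem.List.enumerate V 0).foldl (fun d q => d.insert q.2 (q.1 + 1)) PvDict.empty
        = ((PySem.List.enumerate V 0).map (fun q => (q.2, q.1 + 1))).foldl
            (fun d q => d.insert q.1 q.2) PvDict.empty :=
      pv_foldl_insert_map (PySem.List.enumerate V 0) (fun q => (q.2, q.1 + 1)) PvDict.empty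
    have hfoldB : V.foldl (fun d i => d.insert i (pvDegGet NI i)) PvDict.empty
        = (V.map (fun i => (i, pvDegGet NI i))).foldl
            (fun d q => d.insert q.1 q.2) PvDict.empty :=
      pv_foldl_insert_map V (fun i => (i, pvDegGet NI i)) PvDict.empty
    set L : List (Int × Int) := V.map (fun i => (i, pvDegGet NI i)) with hL
    have hLA : (PySem.List.enumerate V 0).map (fun q => (q.2, q.1 + 1)) = L := by
      refine List.ext_getElem (by simp [hL, PySem.List.length_enumerate]) ?_
      intro k h1 h2
      have hkV : k < V.length := by simpa [hL] using h2
      have hke : k < (PySem.List.enumerate V 0).length := by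
        simpa [PySem.List.length_enumerate] using hkV
      simp only [hL, List.getElem_map]
      rw [PySem.List.getElem_enumerate V 0 k hke]
      have hVk := hVmem V[k] (List.getElem_mem hkV)
      have hrank : pvDegGet NI V[k] = ((k : Int) + 1) := by
        rw [hNIval V[k] (by omega) (by omega)]
        unfold pvCnt
        rw [pv_countP_rank V hVpair k hkV V[k] rfl]
        push_cast; ring
      rw [hrank]
      norm_num
    rw [hfoldA, hfoldB, hLA]
    set D := L.foldl (fun d q => d.insert q.1 q.2) PvDict.empty with hD
    have hLkeys : L.map (·.1) = V := by
      rw [hL, List.map_map]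
      simp [Function.comp_def]
    have hkeys : D.keys = V := by
      rw [hD, pv_keys_fold L PvDict.empty (by rw [hLkeys]; exact hVnodup)
        (fun q _ => pvDict_contains_empty q.1)]
      simp [PvDict.keys, PvDict.empty, hLkeys]
    have hcont : (fun e : Int × Int => D.contains e.1 && D.contains e.2)
        = (fun e : Int × Int => PySem.Set.contains V e.1 && PySem.Set.contains V e.2) := by
      funext e
      rw [hD, pv_contains_fold, pv_contains_fold, hLkeys,
        PySem.Set.contains_eq_listContains, PySem.Set.contains_eq_listContains]
      simp [pvDict_contains_empty]
    rw [hcont]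
    -- the relabelling maps agree on every surviving edge
    have hmap : (edges.filter (fun e => PySem.Set.contains V e.1 && PySem.Set.contains V e.2)).map
          (fun e => (D.getD e.1 0, D.getD e.2 0))
        = (edges.filter (fun e => PySem.Set.contains V e.1 && PySem.Set.contains V e.2)).map
          (fun e => (pvDegGet NI e.1, pvDegGet NI e.2)) := by
      refine List.map_congr_left ?_
      intro e he
      have hf := (List.mem_filter.mp he).2
      have h1 : e.1 ∈ V := by
        have := (Bool.and_eq_true _ _).mp hf
        rw [PySem.Set.contains_eq_listContains] at this
        simpa using this.1
      have h2 : e.2 ∈ V := by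
        have := (Bool.and_eq_true _ _).mp hf
        rw [PySem.Set.contains_eq_listContains] at this
        simpa using this.2
      have hg1 : D.getD e.1 0 = pvDegGet NI e.1 := by
        rw [hD]
        exact pv_getD_fold L PvDict.empty e.1 (pvDegGet NI e.1) 0
          (by rw [hLkeys]; exact hVnodup)
          (by rw [hL]; exact List.mem_map_of_mem h1)
      have hg2 : D.getD e.2 0 = pvDegGet NI e.2 := by
        rw [hD]
        exact pv_getD_fold L PvDict.empty e.2 (pvDegGet NI e.2) 0
          (by rw [hLkeys]; exact hVnodup)
          (by rw [hL]; exact List.mem_map_of_mem h2)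
      rw [hg1, hg2]
    rw [hmap, hkeys, hofV]
    -- counts: one rev entry per valid node
    have hlen : D.len = PySem.Set.len V := by
      have : D.rev.length = D.keys.length := by
        rw [PvDict.keys, List.length_map, List.length_reverse]
      rw [PvDict.len, this, hkeys]
      simp [PySem.Set.len]
    rw [hlen]

-- ===== VERDICT (by name: the statement is the Claim_ definition above) =====
theorem prune_by_degree_spec : Claim_equal_prune_by_degree := by
  intro n edges lower_bound _ _
  exact prune_by_degree_eq_alt n edges lower_bound
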